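-- pv_equiv track=rewrite | github.com/houzhenliu/rlaux | rlaux/web.py | _parse_command_params
-- ===== SOURCE A (Python) =====
-- import shlex
--
-- def _collect_option_values(args: list[str], start_idx: int) -> tuple[str, int]:
--     values: list[str] = []
--     i = start_idx
--     while i < len(args) and not args[i].startswith("-"):
--         values.append(args[i])
--         i += 1
--
--     if not values:
--         return "true", start_idx
--     if len(values) == 1:
--         return values[0], i
--     return " ".join(values), i
--
-- def _parse_command_params(command: str) -> list[tuple[str, str]]:
--     try:
--         tokens = shlex.split(command)
--     except ValueError:
--         return [("raw", command)]
--
--     if len(tokens) <= 1: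
--         return []
--
--     args = tokens[1:]
--     rows: list[tuple[str, str]] = []
--     pos_idx = 0
--     i = 0
--
--     while i < len(args):
--         tok = args[i]
--
--         if tok.startswith("--") and len(tok) > 2:
--             if "=" in tok:
--                 name, value = tok.split("=", 1)
--                 rows.append((name, value))
--                 i += 1
--                 continue
--
--             value, next_i = _collect_option_values(args, i + 1)
--             rows.append((tok, value))
--             i = next_i
--             continue
--
--         if tok.startswith("-") and len(tok) > 1:
--             value, next_i = _collect_option_values(args, i + 1)
--             rows.append((tok, value))
--             i = next_i
--             continue
--
--         pos_idx += 1
--         rows.append((f"arg{pos_idx}", tok))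
--         i += 1
--
--     return rows
-- ===== SOURCE B (Python) =====
-- import re
--
-- # One token = a run of plain chars, backslash escapes, single- and double-quoted
-- # sections glued together (POSIX shell quoting).
-- _TOKEN = re.compile(r"""(?: [^ \t\r\n'"\\]+ | \\. | '[^']*' | "(?:[^"\\]|\\.)* " )+""", re.X | re.S)
--
--
-- def _tokenize(command: str) -> list[str]:
--     """Split a shell-style command line into tokens; ValueError on an
--     unterminated quote or a dangling escape."""
--     tokens = []
--     i, n = 0, len(command)
--     while i < n:
--         if command[i] in " \t\r\n":
--             i += 1
--             continue
--         m = _TOKEN.match(command, i)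
--         if m is None:
--             raise ValueError("unterminated quote or escape")
--         tokens.append(_unquote(m.group()))
--         i = m.end()
--     return tokens
--
--
-- def _unquote(span: str) -> str:
--     """Interpret the quoting inside one matched token span."""
--     out = []
--     i = 0
--     while i < len(span):
--         c = span[i]
--         if c == "'":
--             j = span.index("'", i + 1)
--             out.append(span[i + 1:j])
--             i = j + 1
--         elif c == '"':
--             i += 1
--             while span[i] != '"':
--                 if span[i] == "\\" and span[i + 1] in '"\\':
--                     out.append(span[i + 1])
--                     i += 2
--                 elif span[i] == "\\":
--                     out.append(span[i:i + 2])
--                     i += 2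
--                 else:
--                     out.append(span[i])
--                     i += 1
--             i += 1
--         elif c == "\\":
--             out.append(span[i + 1])
--             i += 2
--         else:
--             out.append(c)
--             i += 1
--     return "".join(out)
--
--
-- def _is_option(tok: str) -> bool:
--     return tok.startswith("-") and len(tok) > 1
--
--
-- def _is_eq_option(tok: str) -> bool:
--     return tok.startswith("--") and "=" in tok
--
--
-- def _parse_command_params(command: str) -> list[tuple[str, str]]:
--     try:
--         tokens = _tokenize(command)
--     except ValueError:
--         return [("raw", command)]
--
--     if len(tokens) <= 1:
--         return []
--
--     # Pass 1: group tokens. An option token opens a group; if it can take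
--     # values (not a '--name=value' form), following non-dash tokens are
--     # absorbed as its value list. Anything else is its own positional group.
--     groups: list[tuple[str, list[str] | None]] = []
--     absorbing = False
--     for tok in tokens[1:]:
--         if _is_option(tok):
--             groups.append((tok, []))
--             absorbing = not _is_eq_option(tok)
--         elif absorbing and not tok.startswith("-"):
--             groups[-1][1].append(tok)
--         else:
--             groups.append((tok, None))
--             absorbing = False
--
--     # Pass 2: render each group as one (name, value) row.
--     rows: list[tuple[str, str]] = []
--     pos_idx = 0
--     for head, vals in groups:
--         if vals is None:
--             pos_idx += 1
--             rows.append((f"arg{pos_idx}", head))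
--         elif _is_eq_option(head):
--             name, value = head.split("=", 1)
--             rows.append((name, value))
--         else:
--             rows.append((head, " ".join(vals) if vals else "true"))
--     return rows
-- ===== Notes on version B (the rewrite author's own statement) =====
-- stated objective: alternative
-- what changed: Replaces A's shlex.split call plus index-driven option loop by a regex-driven tokenizer (one compiled pattern matches each token span, then an unquote pass interprets it) followed by a two-pass pipeline: a flag-driven pass groups tokens into option/positional groups, and a second pass renders each group to a (name, value) row.
import Mathlib
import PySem

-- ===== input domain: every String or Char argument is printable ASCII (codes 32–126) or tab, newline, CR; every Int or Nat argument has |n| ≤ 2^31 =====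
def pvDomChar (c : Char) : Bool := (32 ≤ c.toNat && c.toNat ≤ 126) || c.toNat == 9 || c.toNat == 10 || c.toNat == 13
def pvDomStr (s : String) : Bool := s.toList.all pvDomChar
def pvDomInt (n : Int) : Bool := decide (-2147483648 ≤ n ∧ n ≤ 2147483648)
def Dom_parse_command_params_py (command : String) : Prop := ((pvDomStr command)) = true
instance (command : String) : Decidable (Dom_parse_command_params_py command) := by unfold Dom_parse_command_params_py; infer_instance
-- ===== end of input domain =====

-- B re-decomposes A's parse: a regex-driven tokenizer (span match + unquote) instead of A's shlex
-- call, then a two-pass group-then-render pipeline instead of A's index-driven loop (objective: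
-- alternative; same O(n), measurably faster by constant factor).

-- ===== PORT A =====

-- shlex.split(command) (POSIX mode) is not in PySem; hand port, exact on the printable-ASCII/tab/
-- newline/CR domain.
def pyShlexIsWs (c : Char) : Bool := c == ' ' || c == '\t' || c == '\r' || c == '\n'

-- single-quoted section: chars until the closing '; none = no closing quotation (ValueError)
def pyShlexSq : List Char → Option (List Char × List Char)
  | [] => none
  | '\'' :: r => some ([], r)
  | d :: r => (pyShlexSq r).map (fun br => (d :: br.1, br.2))

-- double-quoted section with \" and \\ escapes; none = ValueError
def pyShlexDq : List Char → Option (List Char × List Char)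
  | [] => none
  | '"' :: r => some ([], r)
  | '\\' :: [] => none
  | '\\' :: e :: r =>
      if e == '"' || e == '\\' then (pyShlexDq r).map (fun br => (e :: br.1, br.2))
      else (pyShlexDq r).map (fun br => ('\\' :: e :: br.1, br.2))
  | d :: r => (pyShlexDq r).map (fun br => (d :: br.1, br.2))

-- the main shlex state machine (posix, whitespace_split): word chars, \ escapes, ' and " sections.
-- fuel is a totality guard only: it starts at length+1 and every step consumes at least one char,
-- so the fuel-0 branch is never reached.
def pyShlexLoop (fuel : Nat) (l : List Char) (tok : List Char) (has : Bool) (res : List String) :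
    Option (List String) :=
  match fuel with
  | 0 => none
  | fuel + 1 =>
    match l with
    | [] => some (res ++ if has then [String.ofList tok] else [])
    | c :: r =>
      if pyShlexIsWs c then
        if has then pyShlexLoop fuel r [] false (res ++ [String.ofList tok])
        else pyShlexLoop fuel r tok has res
      else if c == '\'' then
        match pyShlexSq r with
        | none => none
        | some (b, r') => pyShlexLoop fuel r' (tok ++ b) true res
      else if c == '"' then
        match pyShlexDq r with
        | none => none
        | some (b, r') => pyShlexLoop fuel r' (tok ++ b) true res
      else if c == '\\' then
        match r with
        | [] => none
        | e :: r' => pyShlexLoop fuel r' (tok ++ [e]) true res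
      else pyShlexLoop fuel r (tok ++ [c]) true res

-- shlex.split: some tokens, or none where CPython raises ValueError
def pyShlexSplit (s : String) : Option (List String) :=
  pyShlexLoop (s.toList.length + 1) s.toList [] false []

-- _collect_option_values' while loop: leading non-'-' tokens, and the rest of the args
def pyCollectVals : List String → List String × List String
  | [] => ([], [])
  | a :: rest =>
      if PySem.Str.startswith a "-" then ([], a :: rest)
      else
        let (vs, r) := pyCollectVals rest
        (a :: vs, r)

-- the value _collect_option_values returns from its gathered list
def pyCollectValue (vs : List String) : String :=
  match vs with
  | [] => "true"
  | [v] => v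
  | vs => PySem.Str.join " " vs

-- tok.split("=", 1) unpacked to (name, value); '=' is guaranteed present at the call site
def pySplitEq (tok : String) : String × String :=
  match PySem.Str.splitMax? tok "=" 1 with
  | some (n :: v :: _) => (n, v)
  | _ => (tok, "")   -- unreachable: sep "=" is nonempty and '=' ∈ tok gives two pieces

-- A's main while loop over args, with the running positional counter.
-- fuel is a totality guard only (the loop advances i by at least 1): it starts at length+1,
-- so the fuel-0 branch is never reached.
def pyRowsA (fuel : Nat) (args : List String) (pos : Int) : List (String × String) :=
  match fuel with
  | 0 => []
  | fuel + 1 =>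
    match args with
    | [] => []
    | tok :: rest =>
      if PySem.Str.startswith tok "--" && decide (2 < PySem.Str.len tok) then
        if PySem.Str.isIn "=" tok then
          pySplitEq tok :: pyRowsA fuel rest pos
        else
          (tok, pyCollectValue (pyCollectVals rest).1) :: pyRowsA fuel (pyCollectVals rest).2 pos
      else if PySem.Str.startswith tok "-" && decide (1 < PySem.Str.len tok) then
        (tok, pyCollectValue (pyCollectVals rest).1) :: pyRowsA fuel (pyCollectVals rest).2 pos
      else
        ("arg" ++ PySem.Int.toStr (pos + 1), tok) :: pyRowsA fuel rest (pos + 1)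

def parse_command_params_py (command : String) : List (String × String) :=
  match pyShlexSplit command with
  | none => [("raw", command)]
  | some tokens =>
    if tokens.length ≤ 1 then []
    else pyRowsA ((tokens.drop 1).length + 1) (tokens.drop 1) 0

-- ===== PORT B =====

-- Source B's whitespace set " \t\r\n" and the regex character class [^ \t\r\n'"\\]
def bWs (c : Char) : Bool := c == ' ' || c == '\t' || c == '\r' || c == '\n'

def bPlain (c : Char) : Bool :=
  !(c == ' ' || c == '\t' || c == '\r' || c == '\n' || c == '\'' || c == '"' || c == '\\')

-- re is not in PySem, so Source B's _TOKEN regex is ported by hand as the deterministic matcher of its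
-- language (the four alternatives have disjoint first characters, so the greedy match is exact).

-- regex piece '[^']*' after the opening quote: span through the closing quote, or no match
def bSpanSq : List Char → Option (List Char × List Char)
  | [] => none
  | '\'' :: r => some (['\''], r)
  | c :: r => (bSpanSq r).map (fun p => (c :: p.1, p.2))

-- regex piece "(?:[^"\]|\.)*" after the opening quote: span through the closing quote, or no match
def bSpanDq : List Char → Option (List Char × List Char)
  | [] => none
  | '"' :: r => some (['"'], r)
  | '\\' :: [] => none
  | '\\' :: e :: r => (bSpanDq r).map (fun p => ('\\' :: e :: p.1, p.2))
  | c :: r => (bSpanDq r).map (fun p => (c :: p.1, p.2))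

-- one alternative of the regex: the matched span and the rest, or no match at this position
def bChunk : List Char → Option (List Char × List Char)
  | [] => none
  | c :: r =>
    if bPlain c then some (c :: r.takeWhile bPlain, r.dropWhile bPlain)
    else if c == '\\' then
      match r with
      | [] => none
      | e :: r' => some (['\\', e], r')
    else if c == '\'' then (bSpanSq r).map (fun p => ('\'' :: p.1, p.2))
    else if c == '"' then (bSpanDq r).map (fun p => ('"' :: p.1, p.2))
    else none

theorem bSpanSq_len : ∀ l p, bSpanSq l = some p → p.2.length ≤ l.length := by
  intro l
  induction l using bSpanSq.induct with
  | case1 => intro p h; simp [bSpanSq] at h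
  | case2 r => intro p h; simp [bSpanSq] at h; simp [← h]
  | case3 c r hne ih =>
    intro p h
    simp only [bSpanSq] at h
    cases hr : bSpanSq r with
    | none => simp [hr] at h
    | some q => simp [hr] at h; have := ih q hr; simp [← h]; omega

theorem bSpanDq_len : ∀ l p, bSpanDq l = some p → p.2.length ≤ l.length := by
  intro l
  induction l using bSpanDq.induct with
  | case1 => intro p h; simp [bSpanDq] at h
  | case2 r => intro p h; simp [bSpanDq] at h; simp [← h]
  | case3 => intro p h; simp [bSpanDq] at h
  | case4 e r ih =>
    intro p h
    simp only [bSpanDq] at h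
    cases hr : bSpanDq r with
    | none => simp [hr] at h
    | some q => simp [hr] at h; have := ih q hr; simp [← h]; omega
  | case5 c r h1 h2 h3 ih =>
    intro p h
    simp only [bSpanDq] at h
    cases hr : bSpanDq r with
    | none => simp [hr] at h
    | some q => simp [hr] at h; have := ih q hr; simp [← h]; omega

theorem bChunk_len : ∀ l p, bChunk l = some p → p.2.length < l.length := by
  intro l p h
  match l with
  | [] => simp [bChunk] at h
  | c :: r =>
    simp only [bChunk] at h
    split_ifs at h with h1 h2 h3 h4
    · cases h; have := r.length_dropWhile_le bPlain; simp; omega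
    · match r with
      | [] => simp at h
      | e :: r' => simp at h; rw [← h]; simp
    · cases hr : bSpanSq r with
      | none => simp [hr] at h
      | some q =>
        simp [hr] at h; have := bSpanSq_len r q hr; simp [← h]; omega
    · cases hr : bSpanDq r with
      | none => simp [hr] at h
      | some q =>
        simp [hr] at h; have := bSpanDq_len r q hr; simp [← h]; omega

def bChunksLoop (l : List Char) (acc : List Char) : List Char × List Char :=
  match h : bChunk l with
  | none => (acc, l)
  | some (s, r) => bChunksLoop r (acc ++ s)
termination_by l.length
decreasing_by exact bChunk_len l (s, r) h

theorem bChunksLoop_none (l acc : List Char) (h : bChunk l = none) :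
    bChunksLoop l acc = (acc, l) := by
  rw [bChunksLoop]
  split
  · rfl
  · rename_i s r heq; rw [h] at heq; cases heq

theorem bChunksLoop_some (l acc s r : List Char) (h : bChunk l = some (s, r)) :
    bChunksLoop l acc = bChunksLoop r (acc ++ s) := by
  rw [bChunksLoop]
  split
  · rename_i heq; rw [h] at heq; cases heq
  · rename_i s' r' heq; rw [h] at heq; cases heq; rfl

theorem bChunksLoop_len : ∀ l acc, (bChunksLoop l acc).2.length ≤ l.length := by
  intro l acc
  induction l, acc using bChunksLoop.induct with
  | case1 l acc h => rw [bChunksLoop_none l acc h]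
  | case2 l acc s r h ih =>
    rw [bChunksLoop_some l acc s r h]
    have hlen := bChunk_len l (s, r) h
    simp only at hlen
    omega

-- _TOKEN.match at a position: the full greedy (chunk)+ span and the rest, or None
def bMatch (l : List Char) : Option (List Char × List Char) :=
  match bChunk l with
  | none => none
  | some (s, r) => some (bChunksLoop r s)

theorem bMatch_len : ∀ l p, bMatch l = some p → p.2.length < l.length := by
  intro l p h
  unfold bMatch at h
  cases hc : bChunk l with
  | none => simp [hc] at h
  | some q =>
    simp [hc] at h
    have h1 := bChunksLoop_len q.2 q.1
    have h2 := bChunk_len l q hc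
    simp [← h]
    omega

-- _unquote's span.index("'", i+1) scan: chars before the quote, and after it
def bUqSq : List Char → List Char × List Char
  | [] => ([], [])
  | '\'' :: r => ([], r)
  | c :: r => ((bUqSq r).1.cons c, (bUqSq r).2)

-- _unquote's inner double-quote while loop: interpreted content up to the closing quote, and after
def bUqDq : List Char → List Char × List Char
  | [] => ([], [])
  | '"' :: r => ([], r)
  | '\\' :: [] => (['\\'], [])
  | '\\' :: e :: r =>
      if e == '"' || e == '\\' then ((bUqDq r).1.cons e, (bUqDq r).2)
      else (('\\' :: e :: (bUqDq r).1), (bUqDq r).2)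
  | c :: r => ((bUqDq r).1.cons c, (bUqDq r).2)

theorem bUqSq_len : ∀ l, (bUqSq l).2.length ≤ l.length := by
  intro l
  induction l using bUqSq.induct with
  | case1 => simp [bUqSq]
  | case2 r => simp [bUqSq]
  | case3 c r hne ih => simp [bUqSq]; omega

theorem bUqDq_len : ∀ l, (bUqDq l).2.length ≤ l.length := by
  intro l
  induction l using bUqDq.induct with
  | case1 => simp [bUqDq]
  | case2 r => simp [bUqDq]
  | case3 => simp [bUqDq]
  | case4 e r he ih =>
    simp only [bUqDq, he, if_pos]
    simp; omega
  | case5 e r he ih =>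
    simp only [bUqDq, he]
    simp; omega
  | case6 c r h1 h2 h3 ih => simp [bUqDq]; omega

-- _unquote's outer while loop over one matched span
def bUnquote : List Char → List Char
  | [] => []
  | c :: r =>
    if c == '\'' then (bUqSq r).1 ++ bUnquote (bUqSq r).2
    else if c == '"' then (bUqDq r).1 ++ bUnquote (bUqDq r).2
    else if c == '\\' then
      match r with
      | [] => []            -- unreachable: the regex never matches a dangling escape
      | e :: r' => e :: bUnquote r'
    else c :: bUnquote r
termination_by l => l.length
decreasing_by
  · have := bUqSq_len r; simp; omega
  · have := bUqDq_len r; simp; omega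
  · simp
  · simp

-- _tokenize's while loop: skip whitespace, match one token span, unquote it
def bTokenize (l : List Char) (acc : List String) : Option (List String) :=
  match l with
  | [] => some acc
  | c :: r =>
    if bWs c then bTokenize r acc
    else
      match h : bMatch (c :: r) with
      | none => none
      | some (sp, rest) => bTokenize rest (acc ++ [String.ofList (bUnquote sp)])
termination_by l.length
decreasing_by
  · simp
  · exact bMatch_len (c :: r) (sp, rest) h

-- _tokenize: some tokens, or none where it raises ValueError
def bTokenizeTop (s : String) : Option (List String) :=
  bTokenize s.toList []

def bIsOption (tok : String) : Bool :=
  PySem.Str.startswith tok "-" && decide (1 < PySem.Str.len tok)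

def bIsEqOption (tok : String) : Bool :=
  PySem.Str.startswith tok "--" && PySem.Str.isIn "=" tok

-- head.split("=", 1) unpacked to (name, value)
def bSplitEq (head : String) : String × String :=
  match PySem.Str.splitMax? head "=" 1 with
  | some (n :: v :: _) => (n, v)
  | _ => (head, "")   -- unreachable

-- pass 1 step: groups kept in reverse; appending to the open group = rebuilding its head
def bStep (st : List (String × Option (List String)) × Bool) (tok : String) :
    List (String × Option (List String)) × Bool :=
  if bIsOption tok then
    ((tok, some []) :: st.1, !bIsEqOption tok)
  else if st.2 && !(PySem.Str.startswith tok "-") then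
    (match st.1 with
     | (h, some vs) :: t => ((h, some (vs ++ [tok])) :: t, st.2)
     | gs => ((tok, none) :: gs, false))   -- unreachable: absorbing implies last group is an option group
  else
    ((tok, none) :: st.1, false)

def bGroups (toks : List String) : List (String × Option (List String)) :=
  ((toks.foldl bStep ([], false)).1).reverse

-- pass 2 step: render one group, threading the positional counter
def bRenderStep (st : List (String × String) × Int) (g : String × Option (List String)) :
    List (String × String) × Int :=
  match g with
  | (h, none) => (st.1 ++ [("arg" ++ PySem.Int.toStr (st.2 + 1), h)], st.2 + 1)
  | (h, some vs) =>
    if bIsEqOption h then (st.1 ++ [bSplitEq h], st.2)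
    else (st.1 ++ [(h, if vs.isEmpty then "true" else PySem.Str.join " " vs)], st.2)

def bRender (groups : List (String × Option (List String))) : List (String × String) :=
  (groups.foldl bRenderStep ([], 0)).1

def parse_command_params_py_alt (command : String) : List (String × String) :=
  match bTokenizeTop command with
  | none => [("raw", command)]
  | some tokens =>
    if tokens.length ≤ 1 then []
    else bRender (bGroups (tokens.drop 1))

-- ===== PRECONDITION & SPEC =====
def Spec_parse_command_params_py (command : String) (out : List (String × String)) : Prop := out = parse_command_params_py_alt command
instance (command : String) (out : List (String × String)) : Decidable (Spec_parse_command_params_py command out) := by unfold Spec_parse_command_params_py; infer_instance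

-- ===== CLAIM (what is proved, stated in full; the proofs are below) =====
def Claim_equal_parse_command_params_py : Prop := ∀ (command : String), Dom_parse_command_params_py command → Spec_parse_command_params_py command (parse_command_params_py command)

-- ===== LEMMAS AND PROOFS =====

-- ====== tokenizer equivalence: a reference word/loop tokenizer in the middle ======

theorem pyShlexSq_len : ∀ l p, pyShlexSq l = some p → p.2.length ≤ l.length := by
  intro l
  induction l using pyShlexSq.induct with
  | case1 => intro p h; simp [pyShlexSq] at h
  | case2 r => intro p h; simp [pyShlexSq] at h; simp [← h]
  | case3 c r hne ih =>
    intro p h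
    simp only [pyShlexSq] at h
    cases hr : pyShlexSq r with
    | none => simp [hr] at h
    | some q => simp [hr] at h; have := ih q hr; simp [← h]; omega

theorem pyShlexDq_len : ∀ l p, pyShlexDq l = some p → p.2.length ≤ l.length := by
  intro l
  induction l using pyShlexDq.induct with
  | case1 => intro p h; simp [pyShlexDq] at h
  | case2 r => intro p h; simp [pyShlexDq] at h; simp [← h]
  | case3 => intro p h; simp [pyShlexDq] at h
  | case4 e r he ih =>
    intro p h
    simp only [pyShlexDq, he, if_pos] at h
    cases hr : pyShlexDq r with
    | none => simp [hr] at h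
    | some q => simp [hr] at h; have := ih q hr; simp [← h]; omega
  | case5 e r he ih =>
    intro p h
    simp only [pyShlexDq] at h
    rw [if_neg he] at h
    cases hr : pyShlexDq r with
    | none => simp [hr] at h
    | some q => simp [hr] at h; have := ih q hr; simp [← h]; omega
  | case6 c r h1 h2 h3 ih =>
    intro p h
    simp only [pyShlexDq] at h
    cases hr : pyShlexDq r with
    | none => simp [hr] at h
    | some q => simp [hr] at h; have := ih q hr; simp [← h]; omega

-- reference tokenizer: one word starting at a non-space position (content and rest)
def refWord : List Char → Option (List Char × List Char)
  | [] => some ([], [])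
  | c :: r =>
    if bWs c then some ([], c :: r)
    else if c = '\'' then
      match h : pyShlexSq r with
      | none => none
      | some br => (refWord br.2).map (fun p => (br.1 ++ p.1, p.2))
    else if c = '"' then
      match h : pyShlexDq r with
      | none => none
      | some br => (refWord br.2).map (fun p => (br.1 ++ p.1, p.2))
    else if c = '\\' then
      match r with
      | [] => none
      | e :: r' => (refWord r').map (fun p => (e :: p.1, p.2))
    else (refWord r).map (fun p => (c :: p.1, p.2))
termination_by l => l.length
decreasing_by
  · have := pyShlexSq_len r br h; simp; omega
  · have := pyShlexDq_len r br h; simp; omega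
  · simp
  · simp

theorem refWord_nil : refWord [] = some ([], []) := by rw [refWord.eq_def]

theorem refWord_ws (c : Char) (r : List Char) (h : bWs c = true) :
    refWord (c :: r) = some ([], c :: r) := by rw [refWord.eq_def]; simp [h]

theorem refWord_sq (r : List Char) : refWord ('\'' :: r) =
    (match pyShlexSq r with
     | none => none
     | some br => (refWord br.2).map (fun p => (br.1 ++ p.1, p.2))) := by
  rw [refWord.eq_def]; simp [bWs]; cases hq : pyShlexSq r <;> rfl

theorem refWord_dq (r : List Char) : refWord ('"' :: r) =
    (match pyShlexDq r with
     | none => none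
     | some br => (refWord br.2).map (fun p => (br.1 ++ p.1, p.2))) := by
  rw [refWord.eq_def]; simp [bWs]; cases hq : pyShlexDq r <;> rfl

theorem refWord_bs (r : List Char) : refWord ('\\' :: r) =
    (match r with
     | [] => none
     | e :: r' => (refWord r').map (fun p => (e :: p.1, p.2))) := by
  rw [refWord.eq_def]; simp [bWs]

theorem refWord_plain (c : Char) (r : List Char) (h : bWs c = false) (h1 : c ≠ '\'')
    (h2 : c ≠ '"') (h3 : c ≠ '\\') :
    refWord (c :: r) = (refWord r).map (fun p => (c :: p.1, p.2)) := by
  rw [refWord.eq_def]; simp [h, h1, h2, h3]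

theorem refWord_le : ∀ l p, refWord l = some p → p.2.length ≤ l.length := by
  intro l
  induction l using refWord.induct with
  | case1 => intro p h; rw [refWord_nil] at h; cases h; simp
  | case2 c r hws => intro p h; rw [refWord_ws c r hws] at h; cases h; simp
  | case3 r hsq hws => intro p h; rw [refWord_sq] at h; simp [hsq] at h
  | case4 r br hsq hws ih =>
    intro p h
    rw [refWord_sq] at h
    simp only [hsq] at h
    cases hr : refWord br.2 with
    | none => simp [hr] at h
    | some q =>
      simp [hr] at h
      have h1 := ih q hr
      have h2 := pyShlexSq_len r br hsq
      simp [← h]; omega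
  | case5 r hdq hws hne => intro p h; rw [refWord_dq] at h; simp [hdq] at h
  | case6 r br hdq hws hne ih =>
    intro p h
    rw [refWord_dq] at h
    simp only [hdq] at h
    cases hr : refWord br.2 with
    | none => simp [hr] at h
    | some q =>
      simp [hr] at h
      have h1 := ih q hr
      have h2 := pyShlexDq_len r br hdq
      simp [← h]; omega
  | case7 h1 h2 h3 => intro p h; rw [refWord_bs] at h; simp at h
  | case8 e r h1 h2 h3 ih =>
    intro p h
    rw [refWord_bs] at h
    cases hr : refWord r with
    | none => simp [hr] at h
    | some q =>
      simp [hr] at h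
      have := ih q hr
      simp [← h]; omega
  | case9 c r hws h1 h2 h3 ih =>
    intro p h
    rw [refWord_plain c r (by simpa using hws) h1 h2 h3] at h
    cases hr : refWord r with
    | none => simp [hr] at h
    | some q =>
      simp [hr] at h
      have := ih q hr
      simp [← h]; omega

theorem refWord_lt : ∀ c r p, bWs c = false → refWord (c :: r) = some p →
    p.2.length < (c :: r).length := by
  intro c r p hws h
  by_cases h1 : c = '\''
  · subst h1
    rw [refWord_sq] at h
    cases hsq : pyShlexSq r with
    | none => simp [hsq] at h
    | some br =>
      simp only [hsq] at h
      cases hr : refWord br.2 with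
      | none => simp [hr] at h
      | some q =>
        simp [hr] at h
        have := refWord_le br.2 q hr
        have := pyShlexSq_len r br hsq
        simp [← h]; omega
  · by_cases h2 : c = '"'
    · subst h2
      rw [refWord_dq] at h
      cases hdq : pyShlexDq r with
      | none => simp [hdq] at h
      | some br =>
        simp only [hdq] at h
        cases hr : refWord br.2 with
        | none => simp [hr] at h
        | some q =>
          simp [hr] at h
          have := refWord_le br.2 q hr
          have := pyShlexDq_len r br hdq
          simp [← h]; omega
    · by_cases h3 : c = '\\'
      · subst h3
        rw [refWord_bs] at h
        match r with
        | [] => simp at h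
        | e :: r' =>
          cases hr : refWord r' with
          | none => simp [hr] at h
          | some q =>
            simp [hr] at h
            have := refWord_le r' q hr
            simp [← h]; omega
      · rw [refWord_plain c r hws h1 h2 h3] at h
        cases hr : refWord r with
        | none => simp [hr] at h
        | some q =>
          simp [hr] at h
          have := refWord_le r q hr
          simp [← h]; omega

-- reference tokenizer: the whole line, word by word
def refLoop : List Char → List String → Option (List String)
  | [], acc => some acc
  | c :: r, acc =>
    if hws : bWs c then refLoop r acc
    else
      match h : refWord (c :: r) with
      | none => none
      | some p => refLoop p.2 (acc ++ [String.ofList p.1])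
termination_by l _ => l.length
decreasing_by
  · simp
  · exact refWord_lt c r p (by simpa using hws) h

theorem refLoop_nil (acc : List String) : refLoop [] acc = some acc := by rw [refLoop.eq_def]

theorem refLoop_ws (c : Char) (r : List Char) (acc : List String) (h : bWs c = true) :
    refLoop (c :: r) acc = refLoop r acc := by
  rw [refLoop.eq_def]; simp [h]

theorem refLoop_word (c : Char) (r : List Char) (acc : List String) (h : bWs c = false) :
    refLoop (c :: r) acc =
      (match refWord (c :: r) with
       | none => none
       | some p => refLoop p.2 (acc ++ [String.ofList p.1])) := by
  rw [refLoop.eq_def]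
  simp [h]
  cases hq : refWord (c :: r) <;> rfl

theorem lemA : ∀ f l, l.length < f →
    (∀ res, pyShlexLoop f l [] false res = refLoop l res) ∧
    (∀ tok res, pyShlexLoop f l tok true res =
       (refWord l).bind (fun p => refLoop p.2 (res ++ [String.ofList (tok ++ p.1)]))) := by
  intro f
  induction f with
  | zero => intro l h; omega
  | succ n ih =>
    intro l hlen
    match l with
    | [] =>
      constructor
      · intro res; simp [pyShlexLoop, refLoop_nil]
      · intro tok res; simp [pyShlexLoop, refWord_nil, refLoop_nil]
    | c :: r =>
      simp only [List.length_cons] at hlen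
      have ihr := fun (h : r.length < n) => ih r h
      by_cases hws : pyShlexIsWs c = true
      · have hbws : bWs c = true := hws
        constructor
        · intro res
          rw [show pyShlexLoop (n+1) (c::r) [] false res = pyShlexLoop n r [] false res by
            simp [pyShlexLoop, hws]]
          rw [(ihr (by omega)).1 res, refLoop_ws c r res hbws]
        · intro tok res
          rw [show pyShlexLoop (n+1) (c::r) tok true res
                = pyShlexLoop n r [] false (res ++ [String.ofList tok]) by
            simp [pyShlexLoop, hws]]
          rw [(ihr (by omega)).1 (res ++ [String.ofList tok])]
          rw [refWord_ws c r hbws]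
          simp [refLoop_ws c r _ hbws]
      · have hbws : bWs c = false := by simpa using hws
        have hq : ∀ tok res, pyShlexLoop (n+1) (c::r) tok true res =
            (refWord (c::r)).bind
              (fun p => refLoop p.2 (res ++ [String.ofList (tok ++ p.1)])) := by
          intro tok res
          by_cases h1 : c = '\''
          · subst h1
            rw [show pyShlexLoop (n+1) ('\''::r) tok true res =
                (match pyShlexSq r with
                 | none => none
                 | some (b, r') => pyShlexLoop n r' (tok ++ b) true res) by
              simp [pyShlexLoop, hws]]
            rw [refWord_sq]
            cases hsq : pyShlexSq r with
            | none => rfl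
            | some br =>
              obtain ⟨b1, r1⟩ := br
              show pyShlexLoop n r1 (tok ++ b1) true res = _
              rw [((ih r1 (by have := pyShlexSq_len r (b1, r1) hsq; simp at this; omega)).2
                    (tok ++ b1) res)]
              cases hr : refWord r1 with
              | none => simp [hr]
              | some q => simp [hr, List.append_assoc]
          · by_cases h2 : c = '"'
            · subst h2
              rw [show pyShlexLoop (n+1) ('"'::r) tok true res =
                  (match pyShlexDq r with
                   | none => none
                   | some (b, r') => pyShlexLoop n r' (tok ++ b) true res) by
                simp [pyShlexLoop, hws]]
              rw [refWord_dq]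
              cases hdq : pyShlexDq r with
              | none => rfl
              | some br =>
                obtain ⟨b1, r1⟩ := br
                show pyShlexLoop n r1 (tok ++ b1) true res = _
                rw [((ih r1 (by have := pyShlexDq_len r (b1, r1) hdq; simp at this; omega)).2
                      (tok ++ b1) res)]
                cases hr : refWord r1 with
                | none => simp [hr]
                | some q => simp [hr, List.append_assoc]
            · by_cases h3 : c = '\\'
              · subst h3
                rw [refWord_bs]
                cases r with
                | nil => simp [pyShlexLoop, hws]
                | cons e r' =>
                  rw [show pyShlexLoop (n+1) ('\\'::e::r') tok true res =
                      pyShlexLoop n r' (tok ++ [e]) true res by simp [pyShlexLoop, hws]]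
                  rw [((ih r' (by simp at hlen; omega)).2 (tok ++ [e]) res)]
                  cases hr : refWord r' with
                  | none => simp [hr]
                  | some q => simp [hr, List.append_assoc]
              · rw [refWord_plain c r hbws h1 h2 h3]
                rw [show pyShlexLoop (n+1) (c::r) tok true res =
                    pyShlexLoop n r (tok ++ [c]) true res by
                  simp only [pyShlexLoop, hws, Bool.false_eq_true, if_false]
                  simp [h1, h2, h3]]
                rw [((ih r (by omega)).2 (tok ++ [c]) res)]
                cases hr : refWord r with
                | none => simp [hr]
                | some q => simp [hr, List.append_assoc]
        constructor
        · intro res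
          have h0 : pyShlexLoop (n+1) (c::r) [] false res = pyShlexLoop (n+1) (c::r) [] true res := by
            simp only [pyShlexLoop, hws, Bool.false_eq_true, if_false]
          rw [h0, hq [] res, refLoop_word c r res hbws]
          cases hr : refWord (c :: r) with
          | none => rfl
          | some p => simp
        · exact hq
  
-- ====== B side: the regex tokenizer equals the reference tokenizer ======

theorem bUnquote_nil : bUnquote [] = [] := by rw [bUnquote.eq_def]

theorem bUnquote_sq (r : List Char) :
    bUnquote ('\'' :: r) = (bUqSq r).1 ++ bUnquote (bUqSq r).2 := by
  rw [bUnquote.eq_def]; rfl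

theorem bUnquote_dq (r : List Char) :
    bUnquote ('"' :: r) = (bUqDq r).1 ++ bUnquote (bUqDq r).2 := by
  rw [bUnquote.eq_def]; rfl

theorem bUnquote_bs (r : List Char) :
    bUnquote ('\\' :: r) = (match r with | [] => [] | e :: r' => e :: bUnquote r') := by
  rw [bUnquote.eq_def]; rfl

theorem bUnquote_plain (c : Char) (r : List Char) (h1 : c ≠ '\'') (h2 : c ≠ '"')
    (h3 : c ≠ '\\') : bUnquote (c :: r) = c :: bUnquote r := by
  rw [bUnquote.eq_def]; simp [h1, h2, h3]

theorem bTokenize_nil (acc : List String) : bTokenize [] acc = some acc := by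
  rw [bTokenize.eq_def]

theorem bTokenize_ws (c : Char) (r : List Char) (acc : List String) (h : bWs c = true) :
    bTokenize (c :: r) acc = bTokenize r acc := by
  rw [bTokenize.eq_def]; simp [h]

theorem bTokenize_word (c : Char) (r : List Char) (acc : List String) (h : bWs c = false) :
    bTokenize (c :: r) acc =
      (match bMatch (c :: r) with
       | none => none
       | some p => bTokenize p.2 (acc ++ [String.ofList (bUnquote p.1)])) := by
  rw [bTokenize.eq_def]
  simp [h]
  cases hm : bMatch (c :: r) <;> rfl

-- single-quote section: the raw regex span vs shlex's content
theorem sq_span : ∀ l, bSpanSq l = (pyShlexSq l).map (fun p => (p.1 ++ ['\''], p.2)) := by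
  intro l
  induction l using bSpanSq.induct with
  | case1 => simp [bSpanSq, pyShlexSq]
  | case2 r => simp [bSpanSq, pyShlexSq]
  | case3 c r hne ih =>
    rw [show bSpanSq (c :: r) = (bSpanSq r).map (fun p => (c :: p.1, p.2)) from by
      cases hc : c == '\'' with
      | true => exact absurd (by simpa using hc) (by simpa using hne)
      | false => rw [bSpanSq.eq_def]; simp_all]
    rw [show pyShlexSq (c :: r) = (pyShlexSq r).map (fun p => (c :: p.1, p.2)) from by
      rw [pyShlexSq.eq_def]; simp_all]
    rw [ih]
    cases pyShlexSq r <;> simp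

theorem sq_notin : ∀ l p, pyShlexSq l = some p → '\'' ∉ p.1 := by
  intro l
  induction l using pyShlexSq.induct with
  | case1 => intro p h; simp [pyShlexSq] at h
  | case2 r => intro p h; simp [pyShlexSq] at h; simp [← h]
  | case3 c r hne ih =>
    intro p h
    simp only [pyShlexSq] at h
    cases hr : pyShlexSq r with
    | none => simp [hr] at h
    | some q =>
      simp only [hr, Option.map_some, Option.some_inj] at h
      subst h
      simp only [List.mem_cons, not_or]
      exact ⟨fun he => hne he.symm, ih q hr⟩

theorem sq_uq : ∀ b t, '\'' ∉ b → bUqSq (b ++ '\'' :: t) = (b, t) := by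
  intro b
  induction b with
  | nil => intro t _; simp [bUqSq]
  | cons c b ih =>
    intro t hn
    simp only [List.mem_cons, not_or] at hn
    rw [List.cons_append, show bUqSq (c :: (b ++ '\'' :: t)) =
        ((bUqSq (b ++ '\'' :: t)).1.cons c, (bUqSq (b ++ '\'' :: t)).2) from by
      rw [bUqSq.eq_def]; simp_all [Ne.symm hn.1]]
    rw [ih t hn.2]

-- double-quote section: shlex's content, the regex span, and the unquote scan agree
theorem dq_rel : ∀ l,
    (pyShlexDq l = none ∧ bSpanDq l = none) ∨
    (∃ b sp r', pyShlexDq l = some (b, r') ∧ bSpanDq l = some (sp, r') ∧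
      ∀ t, bUqDq (sp ++ t) = (b, t)) := by
  intro l
  induction l using bSpanDq.induct with
  | case1 => left; simp [pyShlexDq, bSpanDq]
  | case2 r =>
    right
    refine ⟨[], ['"'], r, by simp [pyShlexDq], by simp [bSpanDq], ?_⟩
    intro t; simp [bUqDq]
  | case3 => left; simp [pyShlexDq, bSpanDq]
  | case4 e r ih =>
    rw [show bSpanDq ('\\' :: e :: r) = (bSpanDq r).map (fun p => ('\\' :: e :: p.1, p.2))
      from rfl]
    by_cases he : (e == '"' || e == '\\') = true
    · rw [show pyShlexDq ('\\' :: e :: r) = (pyShlexDq r).map (fun br => (e :: br.1, br.2))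
        from by rw [pyShlexDq.eq_def]; simp [he]]
      rcases ih with ⟨h1, h2⟩ | ⟨b, sp, r', h1, h2, h3⟩
      · left; simp [h1, h2]
      · right
        refine ⟨e :: b, '\\' :: e :: sp, r', by simp [h1], by simp [h2], ?_⟩
        intro t
        rw [show ('\\' :: e :: sp) ++ t = '\\' :: e :: (sp ++ t) from rfl]
        rw [show bUqDq ('\\' :: e :: (sp ++ t)) =
            ((bUqDq (sp ++ t)).1.cons e, (bUqDq (sp ++ t)).2) from by
          rw [bUqDq.eq_def]; simp [he]]
        rw [h3 t]
    · rw [show pyShlexDq ('\\' :: e :: r) =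
          (pyShlexDq r).map (fun br => ('\\' :: e :: br.1, br.2)) from by
        rw [pyShlexDq.eq_def]; simp [he]]
      rcases ih with ⟨h1, h2⟩ | ⟨b, sp, r', h1, h2, h3⟩
      · left; simp [h1, h2]
      · right
        refine ⟨'\\' :: e :: b, '\\' :: e :: sp, r', by simp [h1], by simp [h2], ?_⟩
        intro t
        rw [show ('\\' :: e :: sp) ++ t = '\\' :: e :: (sp ++ t) from rfl]
        rw [show bUqDq ('\\' :: e :: (sp ++ t)) =
            ('\\' :: e :: (bUqDq (sp ++ t)).1, (bUqDq (sp ++ t)).2) from by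
          rw [bUqDq.eq_def]; simp [he]]
        rw [h3 t]
  | case5 c r h1 h2 h3 ih =>
    have hcq : c ≠ '"' := fun h => h1 h
    have hcb : c ≠ '\\' := by
      intro h
      cases r with
      | nil => exact h2 h rfl
      | cons e r'' => exact h3 e r'' h rfl
    rw [show bSpanDq (c :: r) = (bSpanDq r).map (fun p => (c :: p.1, p.2)) from by
      rw [bSpanDq.eq_def]; simp_all]
    rw [show pyShlexDq (c :: r) = (pyShlexDq r).map (fun br => (c :: br.1, br.2)) from by
      rw [pyShlexDq.eq_def]; simp_all]
    rcases ih with ⟨ha, hb⟩ | ⟨b, sp, r', ha, hb, hc⟩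
    · left; simp [ha, hb]
    · right
      refine ⟨c :: b, c :: sp, r', by simp [ha], by simp [hb], ?_⟩
      intro t
      rw [List.cons_append]
      rw [show bUqDq (c :: (sp ++ t)) =
          ((bUqDq (sp ++ t)).1.cons c, (bUqDq (sp ++ t)).2) from by
        rw [bUqDq.eq_def]; simp_all]
      rw [hc t]

theorem takeWhile_all {α : Type} (p : α → Bool) (l : List α) :
    (l.takeWhile p).all p = true :=
  List.all_eq_true.2 (fun a ha => List.mem_takeWhile_imp ha)

theorem bPlain_char (c : Char) (h : bPlain c = true) :
    bWs c = false ∧ c ≠ '\'' ∧ c ≠ '"' ∧ c ≠ '\\' := by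
  have h0 : (c == ' ' || c == '\t' || c == '\r' || c == '\n'
      || c == '\'' || c == '"' || c == '\\') = false := by
    simpa [bPlain] using h
  simp only [Bool.or_eq_false_iff, beq_eq_false_iff_ne, ne_eq] at h0
  obtain ⟨⟨⟨⟨⟨⟨h1, h2⟩, h3⟩, h4⟩, h5⟩, h6⟩, h7⟩ := h0
  exact ⟨by simp [bWs, h1, h2, h3, h4], h5, h6, h7⟩

-- plain runs: refWord and bUnquote pass them through
theorem refWord_run : ∀ run rest, run.all bPlain = true →
    refWord (run ++ rest) = (refWord rest).map (fun p => (run ++ p.1, p.2)) := by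
  intro run
  induction run with
  | nil => intro rest _; cases h : refWord rest <;> simp [h]
  | cons c run ih =>
    intro rest hall
    simp only [List.all_cons, Bool.and_eq_true] at hall
    obtain ⟨hws, h1, h2, h3⟩ := bPlain_char c hall.1
    rw [List.cons_append, refWord_plain c (run ++ rest) hws h1 h2 h3, ih rest hall.2]
    cases h : refWord rest <;> simp [h]

theorem bUnquote_run : ∀ run t, run.all bPlain = true →
    bUnquote (run ++ t) = run ++ bUnquote t := by
  intro run
  induction run with
  | nil => intro t _; simp
  | cons c run ih =>
    intro t hall
    simp only [List.all_cons, Bool.and_eq_true] at hall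
    obtain ⟨hws, h1, h2, h3⟩ := bPlain_char c hall.1
    rw [List.cons_append, bUnquote_plain c (run ++ t) h1 h2 h3, ih t hall.2]
    simp

-- one chunk: its span unquotes to a word piece, and refWord factors through it
theorem chunk_word : ∀ l s r, bChunk l = some (s, r) →
    ∃ w, (∀ t, bUnquote (s ++ t) = w ++ bUnquote t) ∧
      refWord l = (refWord r).map (fun p => (w ++ p.1, p.2)) := by
  intro l s r h
  match l with
  | [] => simp [bChunk] at h
  | c :: r0 =>
    simp only [bChunk] at h
    split_ifs at h with hp hbs hsq hdq
    · -- plain run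
      simp only [Option.some_inj, Prod.mk.injEq] at h
      obtain ⟨hs, hr⟩ := h
      refine ⟨s, ?_, ?_⟩
      · intro t
        rw [← hs]
        obtain ⟨hws, h1, h2, h3⟩ := bPlain_char c hp
        rw [show (c :: r0.takeWhile bPlain) ++ t = c :: (r0.takeWhile bPlain ++ t) from rfl]
        rw [bUnquote_plain c _ h1 h2 h3,
          bUnquote_run (r0.takeWhile bPlain) t (takeWhile_all bPlain r0)]
        simp
      · rw [← hs, ← hr]
        have heq : c :: r0 = (c :: r0.takeWhile bPlain) ++ r0.dropWhile bPlain := by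
          simp [List.takeWhile_append_dropWhile]
        rw [heq, refWord_run (c :: r0.takeWhile bPlain) (r0.dropWhile bPlain)
          (by simp [hp, takeWhile_all bPlain r0])]
    · -- backslash escape
      match r0 with
      | [] => simp at h
      | e :: r1 =>
        simp only [Option.some_inj, Prod.mk.injEq] at h
        obtain ⟨hs, hr⟩ := h
        have hc : c = '\\' := by simpa using hbs
        subst hc
        refine ⟨[e], ?_, ?_⟩
        · intro t
          rw [← hs, show (['\\', e] ++ t) = '\\' :: e :: t from rfl, bUnquote_bs]
          simp
        · rw [← hr, refWord_bs]
          cases hq : refWord r1 <;> simp [hq]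
    · -- single quotes
      have hc : c = '\'' := by simpa using hsq
      subst hc
      rw [sq_span r0] at h
      cases hq : pyShlexSq r0 with
      | none => simp [hq] at h
      | some br =>
        simp only [hq, Option.map_some] at h
        simp only [Option.some_inj, Prod.mk.injEq] at h
        obtain ⟨hs, hr⟩ := h
        refine ⟨br.1, ?_, ?_⟩
        · intro t
          rw [← hs]
          rw [show ('\'' :: (br.1 ++ ['\''])) ++ t = '\'' :: (br.1 ++ '\'' :: t) from by simp,
            bUnquote_sq, sq_uq br.1 t (sq_notin r0 br hq)]
        · rw [refWord_sq, hq, ← hr]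
    · -- double quotes
      have hc : c = '"' := by simpa using hdq
      subst hc
      rcases dq_rel r0 with ⟨h1, h2⟩ | ⟨b, sp, r', h1, h2, h3⟩
      · simp [h2] at h
      · rw [h2] at h
        simp only [Option.map_some, Option.some_inj, Prod.mk.injEq] at h
        obtain ⟨hs, hr⟩ := h
        refine ⟨b, ?_, ?_⟩
        · intro t
          rw [← hs]
          rw [show ('"' :: sp) ++ t = '"' :: (sp ++ t) from rfl, bUnquote_dq, h3 t]
        · rw [refWord_dq, h1, ← hr]

-- where no chunk matches (and the head is not whitespace), the reference word also fails
theorem chunk_none : ∀ c r, bWs c = false → bChunk (c :: r) = none →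
    refWord (c :: r) = none := by
  intro c r hws h
  simp only [bChunk] at h
  split_ifs at h with hp hbs hsq hdq
  · have hc : c = '\\' := by simpa using hbs
    subst hc
    cases r with
    | nil => rw [refWord_bs]
    | cons e r1 => simp at h
  · have hc : c = '\'' := by simpa using hsq
    subst hc
    rw [sq_span r] at h
    cases hq : pyShlexSq r with
    | none => rw [refWord_sq, hq]
    | some br => simp [hq] at h
  · have hc : c = '"' := by simpa using hdq
    subst hc
    rcases dq_rel r with ⟨h1, h2⟩ | ⟨b, sp, r', h1, h2, h3⟩
    · rw [refWord_dq, h1]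
    · simp [h2] at h
  · -- not plain, not \, not ', not ": must be whitespace, contradiction
    exfalso
    simp [bPlain] at hp
    have hw := hws
    simp only [bWs, Bool.or_eq_false_iff, beq_eq_false_iff_ne, ne_eq] at hw
    obtain ⟨⟨⟨w1, w2⟩, w3⟩, w4⟩ := hw
    exact hbs (by simpa using hp w1 w2 w3 w4 (by simpa using hsq) (by simpa using hdq))

-- the greedy (chunk)+ loop: its final span unquotes to the word refWord reads
theorem chunks_word : ∀ n l, l.length ≤ n → ∀ acc wacc,
    (∀ t, bUnquote (acc ++ t) = wacc ++ bUnquote t) →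
    bChunk (bChunksLoop l acc).2 = none ∧
    (bChunksLoop l acc).2.length ≤ l.length ∧
    ∃ w, bUnquote (bChunksLoop l acc).1 = wacc ++ w ∧
      refWord l = (refWord (bChunksLoop l acc).2).map (fun p => (w ++ p.1, p.2)) := by
  intro n
  induction n with
  | zero =>
    intro l hl acc wacc hacc
    have : l = [] := List.eq_nil_of_length_eq_zero (by omega)
    subst this
    have hc : bChunk [] = none := by simp [bChunk]
    rw [bChunksLoop_none [] acc hc]
    refine ⟨hc, by simp, [], ?_, ?_⟩
    · have := hacc []
      simpa [bUnquote_nil] using this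
    · cases h : refWord [] <;> simp
  | succ n ih =>
    intro l hl acc wacc hacc
    cases hc : bChunk l with
    | none =>
      rw [bChunksLoop_none l acc hc]
      refine ⟨hc, by simp, [], ?_, ?_⟩
      · have := hacc []
        simpa [bUnquote_nil] using this
      · cases h : refWord l <;> simp
    | some p =>
      obtain ⟨s, r⟩ := p
      rw [bChunksLoop_some l acc s r hc]
      obtain ⟨w1, hw1, hrw⟩ := chunk_word l s r hc
      have hlen := bChunk_len l (s, r) hc
      simp only at hlen
      have hacc' : ∀ t, bUnquote ((acc ++ s) ++ t) = (wacc ++ w1) ++ bUnquote t := by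
        intro t
        rw [List.append_assoc, hacc (s ++ t), hw1 t, List.append_assoc]
      obtain ⟨hcn, hln, w2, hw2, hrw2⟩ := ih r (by omega) (acc ++ s) (wacc ++ w1) hacc'
      refine ⟨hcn, by omega, w1 ++ w2, by rw [hw2]; simp, ?_⟩
      rw [hrw, hrw2]
      cases h : refWord (bChunksLoop r (acc ++ s)).2 <;> simp

-- Source B's tokenize loop equals the reference tokenizer
theorem lemB : ∀ n l, l.length ≤ n → ∀ acc, bTokenize l acc = refLoop l acc := by
  intro n
  induction n with
  | zero =>
    intro l hl acc
    have : l = [] := List.eq_nil_of_length_eq_zero (by omega)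
    subst this
    rw [bTokenize_nil, refLoop_nil]
  | succ n ih =>
    intro l hl acc
    match l with
    | [] => rw [bTokenize_nil, refLoop_nil]
    | c :: r =>
      simp only [List.length_cons] at hl
      by_cases hws : bWs c = true
      · rw [bTokenize_ws c r acc hws, refLoop_ws c r acc hws, ih r (by omega) acc]
      · have hws' : bWs c = false := by simpa using hws
        rw [bTokenize_word c r acc hws', refLoop_word c r acc hws']
        cases hc : bChunk (c :: r) with
        | none =>
          rw [show bMatch (c :: r) = none from by unfold bMatch; rw [hc]]
          rw [chunk_none c r hws' hc]
        | some p =>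
          obtain ⟨s, r1⟩ := p
          rw [show bMatch (c :: r) = some (bChunksLoop r1 s) from by unfold bMatch; rw [hc]]
          obtain ⟨w1, hw1, hrw⟩ := chunk_word (c :: r) s r1 hc
          have hs1 : ∀ t, bUnquote (s ++ t) = w1 ++ bUnquote t := hw1
          obtain ⟨hcn, hln, w2, hw2, hrw2⟩ :=
            chunks_word r1.length r1 le_rfl s w1 hs1
          have hlen1 := bChunk_len (c :: r) (s, r1) hc
          simp only [List.length_cons] at hlen1
          rw [hrw, hrw2]
          cases hrest : refWord (bChunksLoop r1 s).2 with
          | none =>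
            -- the word fails after this token: the next bTokenize step fails too
            simp only [Option.map_none]
            have h2 := hcn
            cases hr2 : (bChunksLoop r1 s).2 with
            | nil => rw [hr2] at hrest; rw [refWord_nil] at hrest; cases hrest
            | cons d r2 =>
              rw [hr2] at hrest h2
              by_cases hd : bWs d = true
              · rw [refWord_ws d r2 hd] at hrest; cases hrest
              · have hd' : bWs d = false := by simpa using hd
                rw [bTokenize_word d r2 _ hd']
                rw [show bMatch (d :: r2) = none from by unfold bMatch; rw [h2]]
          | some q =>
            -- the word ends here: rest is empty or starts with whitespace
            have hq0 : q = ([], (bChunksLoop r1 s).2) := by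
              cases hr2 : (bChunksLoop r1 s).2 with
              | nil => rw [hr2] at hrest; rw [refWord_nil] at hrest; cases hrest; rfl
              | cons d r2 =>
                rw [hr2] at hrest hcn
                by_cases hd : bWs d = true
                · rw [refWord_ws d r2 hd] at hrest; cases hrest; rfl
                · have hd' : bWs d = false := by simpa using hd
                  rw [chunk_none d r2 hd' hcn] at hrest; cases hrest
            subst hq0
            simp only [Option.map_some]
            rw [hw2]
            simp only [List.append_nil]
            exact ih (bChunksLoop r1 s).2 (by omega) (acc ++ [String.ofList (w1 ++ w2)])

-- the two tokenizers agree
theorem tok_eq : ∀ s, bTokenizeTop s = pyShlexSplit s := by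
  intro s
  unfold bTokenizeTop pyShlexSplit
  rw [lemB s.toList.length s.toList le_rfl []]
  rw [(lemA (s.toList.length + 1) s.toList (by omega)).1 []]

-- ====== groups/render equivalence (rows of A's loop = render ∘ group of B) ======

theorem pyCollectVals_len : ∀ (l : List String), (pyCollectVals l).2.length ≤ l.length := by
  intro l
  induction l with
  | nil => simp [pyCollectVals]
  | cons a rest ih =>
    simp only [pyCollectVals]
    split
    · simp
    · simp only []
      cases h : pyCollectVals rest with
      | mk vs r => simp [h] at ih ⊢; omega

-- proof-level middle form: the groups, computed recursively
def pvGroupsRec (toks : List String) : List (String × Option (List String)) :=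
  match toks with
  | [] => []
  | t :: rest =>
    if bIsOption t then
      if bIsEqOption t then (t, some []) :: pvGroupsRec rest
      else (t, some (pyCollectVals rest).1) :: pvGroupsRec (pyCollectVals rest).2
    else (t, none) :: pvGroupsRec rest
termination_by toks.length
decreasing_by
  all_goals simp
  all_goals have := pyCollectVals_len rest
  all_goals omega

-- proof-level middle form: rendering, computed recursively
def pvRenderRec (groups : List (String × Option (List String))) (pos : Int) :
    List (String × String) :=
  match groups with
  | [] => []
  | (h, none) :: t => ("arg" ++ PySem.Int.toStr (pos + 1), h) :: pvRenderRec t (pos + 1)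
  | (h, some vs) :: t =>
      (if bIsEqOption h then bSplitEq h
       else (h, if vs.isEmpty then "true" else PySem.Str.join " " vs)) :: pvRenderRec t pos

theorem startswith_dd_sw (t : String) (h : PySem.Str.startswith t "--" = true) :
    PySem.Str.startswith t "-" = true := by
  simp only [PySem.Str.startswith_eq] at *
  rw [PySem.Chars.startswith_iff] at *
  exact List.IsPrefix.trans (by decide) h

theorem eqopt_len (t : String) (h : bIsEqOption t = true) :
    (PySem.Str.startswith t "--" && decide (2 < PySem.Str.len t)) = true := by
  unfold bIsEqOption at h
  simp only [Bool.and_eq_true] at h ⊢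
  refine ⟨h.1, ?_⟩
  have hsw := h.1
  simp only [PySem.Str.startswith_eq] at hsw
  rw [PySem.Chars.startswith_iff] at hsw
  obtain ⟨rest, hrest⟩ := hsw
  have hlen : PySem.Str.len t = t.toList.length := by
    simp [PySem.Str.len]
  cases rest with
  | nil =>
    exfalso
    have hin := h.2
    simp only [PySem.Str.isIn_eq] at hin
    rw [show t.toList = "--".toList ++ [] from hrest.symm] at hin
    simp at hin
    revert hin; decide
  | cons a l =>
    rw [hlen, ← hrest]
    simp; omega

theorem pyCollectVals_val (vs : List String) :
    pyCollectValue vs = (if vs.isEmpty then "true" else PySem.Str.join " " vs) := by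
  match vs with
  | [] => rfl
  | [v] =>
    simp [pyCollectValue, PySem.Str.join, PySem.Chars.join_singleton]
  | a :: b :: t => rfl

theorem splitEq_eq (t : String) : pySplitEq t = bSplitEq t := rfl

-- A's loop equals render ∘ group
theorem rowsA_eq_render : ∀ (n : Nat) (args : List String), args.length < n →
    ∀ pos : Int, pyRowsA n args pos = pvRenderRec (pvGroupsRec args) pos := by
  intro n
  induction n with
  | zero => intro args h pos; omega
  | succ n ih =>
    intro args h pos
    match args with
    | [] => simp [pyRowsA, pvGroupsRec, pvRenderRec]
    | tok :: rest =>
      simp only [List.length_cons] at h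
      rw [pyRowsA, pvGroupsRec]
      by_cases h1 : (PySem.Str.startswith tok "--" && decide (2 < PySem.Str.len tok)) = true
      · rw [if_pos h1]
        rw [Bool.and_eq_true] at h1
        have hlen2 : 2 < PySem.Str.len tok := of_decide_eq_true h1.2
        have hopt : bIsOption tok = true := by
          unfold bIsOption
          rw [Bool.and_eq_true]
          exact ⟨startswith_dd_sw tok h1.1, decide_eq_true (by omega)⟩
        by_cases h2 : PySem.Str.isIn "=" tok = true
        · have heq : bIsEqOption tok = true := by
            unfold bIsEqOption
            rw [Bool.and_eq_true]
            exact ⟨h1.1, h2⟩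
          rw [if_pos h2, hopt, heq]
          simp only [if_true, pvRenderRec]
          rw [ih rest (by omega) pos, splitEq_eq, if_pos heq]
        · have h2' : PySem.Str.isIn "=" tok = false := by simpa using h2
          have hne : bIsEqOption tok = false := by
            unfold bIsEqOption
            rw [h2']
            simp
          rw [if_neg h2, hopt, hne]
          simp only [if_true, Bool.false_eq_true, if_false, pvRenderRec]
          have hr : (pyCollectVals rest).2.length < n := by
            have := pyCollectVals_len rest; omega
          rw [ih _ hr pos, pyCollectVals_val, hne]
          simp
      · rw [if_neg h1]
        by_cases h3 : (PySem.Str.startswith tok "-" && decide (1 < PySem.Str.len tok)) = true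
        · rw [if_pos h3]
          have hopt : bIsOption tok = true := h3
          have hne : bIsEqOption tok = false := by
            by_cases hb : bIsEqOption tok = true
            · exact absurd (eqopt_len tok hb) h1
            · simpa using hb
          rw [hopt, hne]
          simp only [if_true, Bool.false_eq_true, if_false, pvRenderRec]
          have hr : (pyCollectVals rest).2.length < n := by
            have := pyCollectVals_len rest; omega
          rw [ih _ hr pos, pyCollectVals_val, hne]
          simp
        · rw [if_neg h3]
          have hnopt : bIsOption tok = false := by
            unfold bIsOption
            simpa using h3
          rw [hnopt]
          simp only [Bool.false_eq_true, if_false, pvRenderRec]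
          rw [ih rest (by omega) (pos + 1)]


-- B's pass-1 foldl equals the recursive grouping (joint statement for the two flag states)
theorem bFold_spec : ∀ (n : Nat) (ts : List String), ts.length ≤ n →
    (∀ gs : List (String × Option (List String)),
        (ts.foldl bStep (gs, false)).1 = (pvGroupsRec ts).reverse ++ gs) ∧
    (∀ (h : String) (vs : List String) (gs : List (String × Option (List String))),
        (ts.foldl bStep ((h, some vs) :: gs, true)).1 =
          (pvGroupsRec (pyCollectVals ts).2).reverse ++
            ((h, some (vs ++ (pyCollectVals ts).1)) :: gs)) := by
  intro n
  induction n with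
  | zero =>
    intro ts hts
    have : ts = [] := List.eq_nil_of_length_eq_zero (by omega)
    subst this
    constructor
    · intro gs; simp [pvGroupsRec]
    · intro h vs gs; simp [pyCollectVals, pvGroupsRec]
  | succ n ih =>
    intro ts hts
    match ts with
    | [] =>
      constructor
      · intro gs; simp [pvGroupsRec]
      · intro h vs gs; simp [pyCollectVals, pvGroupsRec]
    | t :: r =>
      simp only [List.length_cons] at hts
      have hr := ih r (by omega)
      have hF : ∀ gs : List (String × Option (List String)),
          ((t :: r).foldl bStep (gs, false)).1 = (pvGroupsRec (t :: r)).reverse ++ gs := by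
        intro gs
        rw [List.foldl_cons, pvGroupsRec]
        by_cases hopt : bIsOption t = true
        · simp only [hopt, reduceIte]
          by_cases heq : bIsEqOption t = true
          · simp only [heq, reduceIte]
            have hstep : bStep (gs, false) t = ((t, some []) :: gs, false) := by
              simp [bStep, hopt, heq]
            rw [hstep, (hr.1 ((t, some []) :: gs))]
            simp
          · have heq' : bIsEqOption t = false := by simpa using heq
            simp only [heq', Bool.false_eq_true, if_false]
            have hstep : bStep (gs, false) t = ((t, some []) :: gs, true) := by
              simp [bStep, hopt, heq']
            rw [hstep, hr.2 t [] gs]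
            simp
        · have hopt' : bIsOption t = false := by simpa using hopt
          simp only [hopt', Bool.false_eq_true, if_false]
          have hstep : bStep (gs, false) t = ((t, none) :: gs, false) := by
            simp [bStep, hopt']
          rw [hstep, hr.1 ((t, none) :: gs)]
          simp
      refine ⟨hF, ?_⟩
      intro h vs gs
      by_cases hsw : PySem.Str.startswith t "-" = true
      · -- t stops the collection: pyCollectVals returns ([], t :: r); the flag no longer matters
        have hcv : pyCollectVals (t :: r) = ([], t :: r) := by
          simp only [pyCollectVals, hsw, reduceIte]
        rw [hcv]
        have hstep : bStep ((h, some vs) :: gs, true) t = bStep ((h, some vs) :: gs, false) t := by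
          unfold bStep
          by_cases hopt : bIsOption t = true
          · simp only [hopt, reduceIte]
          · have hopt' : bIsOption t = false := by simpa using hopt
            simp only [hopt', Bool.false_eq_true, if_false, hsw, Bool.not_true, Bool.and_false]
        rw [List.foldl_cons, hstep, ← List.foldl_cons]
        rw [hF ((h, some vs) :: gs)]
        simp
      · have hsw' : PySem.Str.startswith t "-" = false := by simpa using hsw
        have hopt : bIsOption t = false := by
          unfold bIsOption; simp only [hsw', Bool.false_and]
        have hstep : bStep ((h, some vs) :: gs, true) t = ((h, some (vs ++ [t])) :: gs, true) := by
          simp only [bStep, hopt, Bool.false_eq_true, if_false, hsw', Bool.not_false,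
            Bool.and_true, reduceIte]
        rw [List.foldl_cons, hstep, hr.2 h (vs ++ [t]) gs]
        have hcv : pyCollectVals (t :: r) =
            (t :: (pyCollectVals r).1, (pyCollectVals r).2) := by
          simp only [pyCollectVals, hsw', Bool.false_eq_true, if_false]
        rw [hcv]
        simp

theorem bGroups_eq (toks : List String) : bGroups toks = pvGroupsRec toks := by
  unfold bGroups
  rw [(bFold_spec toks.length toks le_rfl).1 []]
  simp

-- B's pass-2 foldl equals the recursive rendering
theorem bRender_fold : ∀ (groups : List (String × Option (List String)))
    (acc : List (String × String)) (pos : Int),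
    (groups.foldl bRenderStep (acc, pos)).1 = acc ++ pvRenderRec groups pos := by
  intro groups
  induction groups with
  | nil => intro acc pos; simp [pvRenderRec]
  | cons g t ih =>
    intro acc pos
    match g with
    | (h, none) =>
      rw [List.foldl_cons]
      show (t.foldl bRenderStep (acc ++ [("arg" ++ PySem.Int.toStr (pos + 1), h)], pos + 1)).1 = _
      rw [ih]
      simp [pvRenderRec]
    | (h, some vs) =>
      rw [List.foldl_cons]
      by_cases heq : bIsEqOption h = true
      · show (t.foldl bRenderStep (if bIsEqOption h then (acc ++ [bSplitEq h], pos)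
          else (acc ++ [(h, if vs.isEmpty then "true" else PySem.Str.join " " vs)], pos))).1 = _
        rw [if_pos heq, ih]
        simp [pvRenderRec, heq]
      · show (t.foldl bRenderStep (if bIsEqOption h then (acc ++ [bSplitEq h], pos)
          else (acc ++ [(h, if vs.isEmpty then "true" else PySem.Str.join " " vs)], pos))).1 = _
        rw [if_neg heq, ih]
        simp [pvRenderRec, heq]

-- ===== VERDICT (by name: the statement is the Claim_ definition above) =====
theorem parse_command_params_py_spec : Claim_equal_parse_command_params_py := by
  intro command _
  unfold Spec_parse_command_params_py parse_command_params_py parse_command_params_py_alt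
  rw [tok_eq command]
  cases hs : pyShlexSplit command with
  | none => rfl
  | some tokens =>
    by_cases hlen : tokens.length ≤ 1
    · simp [hlen]
    · simp only [hlen, if_false]
      rw [rowsA_eq_render ((tokens.drop 1).length + 1) (tokens.drop 1) (by omega) 0]
      unfold bRender
      rw [bRender_fold, bGroups_eq]
      simp
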